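-- pv_equiv track=rewrite | github.com/hemna/haminfo | haminfo/utils/__init__.py | rgb_from_name
-- ===== SOURCE A (Python) =====
-- def rgb_from_name(name):
--     """Create an rgb tuple from a string."""
--     hash = 0
--     for char in name:
--         hash = ord(char) + ((hash << 5) - hash)
--     red = hash & 255
--     green = (hash >> 8) & 255
--     blue = (hash >> 16) & 255
--     return red, green, blue
-- ===== SOURCE B (Python) =====
-- def rgb_from_name(name):
--     """Create an rgb tuple from a string."""
--     h = 0
--     p = 1
--     for char in reversed(name):
--         h += ord(char) * p
--         p *= 31
--     return h & 255, (h >> 8) & 255, (h >> 16) & 255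
-- ===== Notes on version B (the rewrite author's own statement) =====
-- stated objective: alternative
-- what changed: B sums contributions ord(c)*p while walking the string in reverse with a running power p of 31 (explicit polynomial-sum state (h,p)), instead of A's forward Horner shift-and-subtract accumulator; same byte masks.
import Mathlib
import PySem

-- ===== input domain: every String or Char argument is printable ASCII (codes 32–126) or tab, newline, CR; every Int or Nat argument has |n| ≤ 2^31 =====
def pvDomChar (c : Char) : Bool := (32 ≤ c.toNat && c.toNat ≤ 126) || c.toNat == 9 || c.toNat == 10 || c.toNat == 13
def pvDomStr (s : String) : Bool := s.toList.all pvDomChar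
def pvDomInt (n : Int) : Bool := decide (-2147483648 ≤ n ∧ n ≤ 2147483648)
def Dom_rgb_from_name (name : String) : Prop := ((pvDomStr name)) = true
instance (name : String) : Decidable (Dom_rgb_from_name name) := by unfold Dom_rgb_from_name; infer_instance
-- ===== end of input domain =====

-- B evaluates the base-31 hash as a polynomial sum with a running power of 31 over the reversed
-- string, instead of Horner's shift/subtract accumulator (objective: alternative decomposition, same cost).

-- ===== PORT A =====
def rgb_from_name (name : String) : Int × Int × Int :=
  let hash : Int := name.toList.foldl (fun h c => (c.toNat : Int) + ((h <<< 5) - h)) 0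
  (PySem.Int.band hash 255, PySem.Int.band (hash >>> 8) 255, PySem.Int.band (hash >>> 16) 255)

-- ===== PORT B =====
def rgb_from_name_alt (name : String) : Int × Int × Int :=
  let hp : Int × Int := name.toList.reverse.foldl
      (fun (hp : Int × Int) (c : Char) => (hp.1 + (c.toNat : Int) * hp.2, hp.2 * 31)) (0, 1)
  let h : Int := hp.1
  (PySem.Int.band h 255, PySem.Int.band (h >>> 8) 255, PySem.Int.band (h >>> 16) 255)

-- ===== PRECONDITION & SPEC =====
def Spec_rgb_from_name (name : String) (out : Int × Int × Int) : Prop := out = rgb_from_name_alt name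
instance (name : String) (out : Int × Int × Int) : Decidable (Spec_rgb_from_name name out) := by unfold Spec_rgb_from_name; infer_instance

-- ===== CLAIM (what is proved, stated in full; the proofs are below) =====
def Claim_equal_rgb_from_name : Prop := ∀ (name : String), Dom_rgb_from_name name → Spec_rgb_from_name name (rgb_from_name name)

-- ===== LEMMAS AND PROOFS =====
theorem pvShl5 (a : Int) : a <<< (5:Int) = 32 * a := by
  have := Int.shiftLeft_eq_mul_pow a 5
  norm_num at this
  omega

def pvPoly : List Char → Int
  | [] => 0
  | c :: l => (c.toNat : Int) * 31 ^ l.length + pvPoly l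

theorem pvFoldA (l : List Char) (a : Int) :
    l.foldl (fun (h : Int) (c : Char) => (c.toNat : Int) + ((h <<< 5) - h)) a = a * 31 ^ l.length + pvPoly l := by
  induction l generalizing a with
  | nil => simp [pvPoly]
  | cons c l ih =>
    simp only [List.foldl_cons, ih, pvPoly, List.length_cons]
    rw [pvShl5]
    ring

theorem pvSumB (l : List Char) :
    l.reverse.foldl
      (fun (hp : Int × Int) (c : Char) => (hp.1 + (c.toNat : Int) * hp.2, hp.2 * 31)) (0, 1)
      = (pvPoly l, 31 ^ l.length) := by
  rw [List.foldl_reverse]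
  induction l with
  | nil => simp [pvPoly]
  | cons c l ih =>
    simp only [List.foldr_cons, ih, pvPoly, List.length_cons]
    exact Prod.ext (by ring) (by ring)

theorem rgb_from_name_spec : Claim_equal_rgb_from_name := by
  intro name _
  unfold Spec_rgb_from_name rgb_from_name rgb_from_name_alt
  simp only [pvFoldA, pvSumB, zero_mul, zero_add]
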